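-- pv_equiv track=rewrite | github.com/tario-you/bus | automation_des.py | turn_to_list
-- ===== SOURCE A (Python) =====
-- def turn_to_list(s):
--     s = list(s)
--     s.reverse()
--
--     result = []
--     cur = []
--     for i in range(len(s)):
--         cur.append(s[i])
--         if i == len(s)-1 or not ((not s[i].isdigit()) or (s[i].isdigit() and (s[i+1].isdigit()) or s[i+1] == '.')) and s[i] != '.':
--             cur.reverse()
--             result.append(''.join(cur))
--             cur = []
--
--     result.reverse()
--     return result
-- ===== SOURCE B (Python) =====
-- def turn_to_list(s):
--     result = []
--     cur = ''
--     prev = None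
--     for ch in s:
--         if prev is not None and ch.isdigit() and not (prev.isdigit() or prev == '.'):
--             result.append(cur)
--             cur = ch
--         else:
--             cur += ch
--         prev = ch
--     if cur:
--         result.append(cur)
--     return result
-- ===== Notes on version B (the rewrite author's own statement) =====
-- stated objective: simpler
-- what changed: Single forward pass with a look-behind state variable instead of A's reverse-the-string scan with index look-ahead, per-token reversal and final result reversal.
import Mathlib
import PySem

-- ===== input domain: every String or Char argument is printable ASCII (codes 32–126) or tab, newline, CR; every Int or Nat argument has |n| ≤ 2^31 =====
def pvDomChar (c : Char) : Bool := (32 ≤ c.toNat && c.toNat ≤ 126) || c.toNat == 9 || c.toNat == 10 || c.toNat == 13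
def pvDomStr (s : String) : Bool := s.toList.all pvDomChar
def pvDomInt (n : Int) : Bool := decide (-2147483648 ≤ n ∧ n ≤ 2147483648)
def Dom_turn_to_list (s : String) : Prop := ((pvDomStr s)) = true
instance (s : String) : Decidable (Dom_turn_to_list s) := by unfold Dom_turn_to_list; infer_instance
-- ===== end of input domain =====

-- B replaces A's reverse-scan with index look-ahead (plus per-token and final reversals)
-- by a single forward pass with a look-behind state variable; same output, objective: simpler.

-- ===== PORT A =====
-- loop body of A's 'for i in range(len(s))' over the reversed character list l (n = len(l))
def stepA (l : List Char) (n : Int) (st : List String × List Char) (i : Int) :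
    List String × List Char :=
  let cur := st.2 ++ [PySem.List.pyGetD l i ' ']
  if (i == n - 1) ||
      ((!((!PySem.Chars.isdigit (PySem.List.pyGetD l i ' ')) ||
          ((PySem.Chars.isdigit (PySem.List.pyGetD l i ' ') &&
            PySem.Chars.isdigit (PySem.List.pyGetD l (i + 1) ' ')) ||
           (PySem.List.pyGetD l (i + 1) ' ' == '.')))) &&
        (PySem.List.pyGetD l i ' ' != '.')) then
    (st.1 ++ [String.ofList cur.reverse], [])
  else
    (st.1, cur)

def turn_to_list (s : String) : List String :=
  let l := s.toList.reverse
  let n : Int := l.length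
  ((PySem.List.pyRange 0 n 1).foldl (stepA l n) ([], [])).1.reverse

-- ===== PORT B =====
-- 'token break before ch when previous char is p' (B's loop condition)
def brk (p c : Char) : Bool := PySem.Chars.isdigit c && !(PySem.Chars.isdigit p || p == '.')

-- loop body of B's 'for ch in s' (state: result, cur, prev)
def stepB (st : List String × List Char × Option Char) (ch : Char) :
    List String × List Char × Option Char :=
  match st.2.2 with
  | some p =>
      if brk p ch then
        (st.1 ++ [String.ofList st.2.1], [ch], some ch)
      else
        (st.1, st.2.1 ++ [ch], some ch)
  | none => (st.1, st.2.1 ++ [ch], some ch)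

-- B's epilogue: 'if cur: result.append(cur)'
def finB (st : List String × List Char × Option Char) : List String :=
  if st.2.1.isEmpty then st.1 else st.1 ++ [String.ofList st.2.1]

def turn_to_list_alt (s : String) : List String :=
  finB (s.toList.foldl stepB ([], [], none))

-- ===== PRECONDITION & SPEC =====
def Spec_turn_to_list (s : String) (out : List String) : Prop := out = turn_to_list_alt s
instance (s : String) (out : List String) : Decidable (Spec_turn_to_list s out) := by
  unfold Spec_turn_to_list; infer_instance

-- ===== CLAIM (what is proved, stated in full; the proofs are below) =====
def Claim_equal_turn_to_list : Prop := ∀ (s : String), Dom_turn_to_list s → Spec_turn_to_list s (turn_to_list s)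

-- ===== LEMMAS AND PROOFS =====

-- forward tokenizer (reference spec): specGo p acc t tokenizes t with previous char p and pending token acc
def specGo (p : Char) (acc : List Char) : List Char → List (List Char)
  | [] => [acc]
  | c :: t => if brk p c then acc :: specGo c [c] t else specGo c (acc ++ [c]) t

def spec : List Char → List (List Char)
  | [] => []
  | c :: t => specGo c [c] t

-- extend the LAST token of a token list by v
def glueLast (ts : List (List Char)) (v : List Char) : List (List Char) :=
  match ts with
  | [] => []
  | [t] => [t ++ v]
  | t :: ts => t :: glueLast ts v

-- A's loop as structural recursion on the reversed list with one-element look-ahead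
def ga (res : List String) (cur : List Char) : List Char → List String
  | [] => res
  | [c] => res ++ [String.ofList (cur ++ [c]).reverse]
  | c :: d :: t =>
      if brk d c then ga (res ++ [String.ofList (cur ++ [c]).reverse]) [] (d :: t)
      else ga res (cur ++ [c]) (d :: t)

lemma condA_eq (c d : Char) :
    ((!((!PySem.Chars.isdigit c) ||
        ((PySem.Chars.isdigit c && PySem.Chars.isdigit d) || (d == '.')))) &&
      (c != '.')) = brk d c := by
  cases hc : PySem.Chars.isdigit c with
  | false => simp [brk, hc]
  | true =>
    have hne : c ≠ '.' := by rintro rfl; exact absurd hc (by decide)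
    simp [brk, hc, hne]

lemma stepA_foldl (l : List Char) (k : Nat) (t : List Char) (res : List String)
    (cur : List Char) (ht : l.drop k = t) :
    ((PySem.List.pyRange (k : Int) (l.length : Int) 1).foldl
        (stepA l (l.length : Int)) (res, cur)).1 = ga res cur t := by
  induction t generalizing k res cur with
  | nil =>
    have hk : l.length ≤ k := List.drop_eq_nil_iff.mp ht
    rw [PySem.List.pyRange_one_eq_nil (by exact_mod_cast hk)]
    simp [ga]
  | cons c t ih =>
    have hk : k < l.length := by
      by_contra h
      rw [List.drop_eq_nil_iff.mpr (by omega)] at ht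
      simp at ht
    have hdc : l.drop k = l[k] :: l.drop (k + 1) := List.drop_eq_getElem_cons hk
    rw [ht] at hdc
    have hgetk : c = l[k] := (List.cons.injEq ..).mp hdc |>.1
    have hdrop : l.drop (k + 1) = t := ((List.cons.injEq ..).mp hdc |>.2).symm
    rw [PySem.List.pyRange_one_cons (by exact_mod_cast hk), List.foldl_cons]
    have hget : PySem.List.pyGetD l (k : Int) ' ' = c := by
      rw [PySem.List.pyGetD_natCast, List.getD_eq_getElem?_getD,
          List.getElem?_eq_getElem hk, Option.getD_some, hgetk]
    have hcast : ((k : Int) + 1) = ((k + 1 : Nat) : Int) := by push_cast; ring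
    cases t with
    | nil =>
      have hlen : l.length = k + 1 := by
        have := List.drop_eq_nil_iff.mp hdrop
        omega
      have hcond : ((k : Int) == (l.length : Int) - 1) = true := by
        rw [hlen]; simp
      simp only [stepA, hget, hcond, Bool.true_or]
      rw [hcast, hlen, PySem.List.pyRange_one_eq_nil (by omega)]
      simp [ga]
    | cons d t' =>
      have hk1 : k + 1 < l.length := by
        by_contra h
        rw [List.drop_eq_nil_iff.mpr (by omega)] at hdrop
        simp at hdrop
      have hdc1 : l.drop (k + 1) = l[k + 1] :: l.drop (k + 2) := List.drop_eq_getElem_cons hk1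
      rw [hdrop] at hdc1
      have hgetk1 : d = l[k + 1] := (List.cons.injEq ..).mp hdc1 |>.1
      have hget1 : PySem.List.pyGetD l ((k : Int) + 1) ' ' = d := by
        rw [hcast, PySem.List.pyGetD_natCast, List.getD_eq_getElem?_getD,
            List.getElem?_eq_getElem hk1, Option.getD_some, hgetk1]
      have hcond : ((k : Int) == (l.length : Int) - 1) = false := by
        simp only [beq_eq_false_iff_ne, ne_eq]
        omega
      simp only [stepA, hget, hget1, hcond, Bool.false_or, condA_eq c d]
      by_cases hb : brk d c = true
      · rw [if_pos hb]
        rw [hcast, ih (k + 1) (res ++ [String.ofList (cur ++ [c]).reverse]) [] hdrop]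
        simp only [ga, if_pos hb]
      · rw [if_neg hb]
        rw [hcast, ih (k + 1) res (cur ++ [c]) hdrop]
        simp only [ga, if_neg hb]

lemma specGo_ne_nil (p : Char) (acc : List Char) (t : List Char) : specGo p acc t ≠ [] := by
  induction t generalizing p acc with
  | nil => simp [specGo]
  | cons c t ih =>
    simp only [specGo]
    split
    · simp
    · exact ih _ _

lemma glueLast_nil_right (ts : List (List Char)) : glueLast ts [] = ts := by
  induction ts with
  | nil => simp [glueLast]
  | cons a ts ih =>
    cases ts with
    | nil => simp [glueLast]
    | cons b ts' => simp only [glueLast]; rw [ih]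

lemma glueLast_cons (a : List Char) (ts : List (List Char)) (v : List Char) (h : ts ≠ []) :
    glueLast (a :: ts) v = a :: glueLast ts v := by
  cases ts with
  | nil => exact absurd rfl h
  | cons b ts' => simp [glueLast]

lemma glueLast_append_singleton (ts : List (List Char)) (t v : List Char) :
    glueLast (ts ++ [t]) v = ts ++ [t ++ v] := by
  induction ts with
  | nil => simp [glueLast]
  | cons a ts ih =>
    cases ts with
    | nil => simp [glueLast]
    | cons b ts' =>
      rw [List.cons_append] at ih
      simp only [List.cons_append, glueLast]
      rw [ih]
      simp

lemma glueLast_glueLast (ts : List (List Char)) (v v' : List Char) :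
    glueLast (glueLast ts v) v' = glueLast ts (v ++ v') := by
  induction ts with
  | nil => simp [glueLast]
  | cons a ts ih =>
    cases ts with
    | nil => simp [glueLast]
    | cons b ts' =>
      have h1 : glueLast (b :: ts') v ≠ [] := by
        cases ts' <;> simp [glueLast]
      rw [glueLast_cons a (b :: ts') v (by simp),
          glueLast_cons a _ v' h1, glueLast_cons a _ (v ++ v') (by simp), ih]

lemma specGo_snoc (t : List Char) (p : Char) (acc : List Char) (c : Char) :
    specGo p acc (t ++ [c]) =
      if brk (t.getLastD p) c then specGo p acc t ++ [[c]]
      else glueLast (specGo p acc t) [c] := by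
  induction t generalizing p acc with
  | nil =>
    by_cases h : brk p c = true <;> simp [specGo, glueLast, h]
  | cons e t ih =>
    simp only [List.cons_append, specGo, List.getLastD_cons]
    by_cases h : brk p e = true
    · rw [if_pos h, if_pos h, ih]
      by_cases h2 : brk (t.getLastD e) c = true
      · rw [if_pos h2, if_pos h2]; simp
      · rw [if_neg h2, if_neg h2, glueLast_cons _ _ _ (specGo_ne_nil _ _ _)]
    · rw [if_neg h, if_neg h, ih]

lemma spec_snoc (u : List Char) (hu : u ≠ []) (c : Char) :
    spec (u ++ [c]) =
      if brk (u.getLast hu) c then spec u ++ [[c]] else glueLast (spec u) [c] := by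
  cases u with
  | nil => exact absurd rfl hu
  | cons a t₁ =>
    have hlast : (a :: t₁).getLast hu = t₁.getLastD a := by
      induction t₁ generalizing a with
      | nil => simp
      | cons b t ih => rw [List.getLast_cons_cons, ih, List.getLastD_cons]
    simp only [spec, List.cons_append, hlast]
    exact specGo_snoc t₁ a [a] c

lemma ga_spec (v : List Char) (w : List Char) (res : List String) :
    ga res w v = res ++ ((glueLast (spec v.reverse) w.reverse).map String.ofList).reverse := by
  induction v generalizing w res with
  | nil => simp [ga, spec, glueLast]
  | cons c v ih =>
    cases v with
    | nil => simp [ga, spec, specGo, glueLast]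
    | cons d t =>
      have hne : (d :: t).reverse ≠ [] := by simp
      have hlast : (d :: t).reverse.getLast hne = d := by
        have h1 : (d :: t).reverse.getLast? = some d := by
          rw [List.getLast?_reverse]; rfl
        rw [List.getLast?_eq_getLast hne] at h1
        exact Option.some.inj h1
      rw [List.reverse_cons, spec_snoc _ hne c, hlast]
      simp only [ga]
      by_cases hb : brk d c = true
      · rw [if_pos hb, if_pos hb, ih, glueLast_append_singleton]
        simp [glueLast_nil_right]
      · rw [if_neg hb, if_neg hb, ih, glueLast_glueLast]
        simp

lemma A_eq_spec (s : String) : turn_to_list s = (spec s.toList).map String.ofList := by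
  have h0 := stepA_foldl s.toList.reverse 0 s.toList.reverse [] [] (by simp)
  simp only [Nat.cast_zero] at h0
  have : turn_to_list s =
      ((PySem.List.pyRange 0 (s.toList.reverse.length : Int) 1).foldl
        (stepA s.toList.reverse (s.toList.reverse.length : Int)) ([], [])).1.reverse := rfl
  rw [this, h0, ga_spec]
  simp [glueLast_nil_right]

lemma stepB_foldl (t : List Char) (res : List String) (acc : List Char) (p : Char)
    (hacc : acc ≠ []) :
    finB (t.foldl stepB (res, acc, some p)) = res ++ (specGo p acc t).map String.ofList := by
  induction t generalizing res acc p with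
  | nil => simp [finB, List.isEmpty_iff, hacc, specGo]
  | cons c t ih =>
    rw [List.foldl_cons]
    have hstep : stepB (res, acc, some p) c =
        if brk p c then (res ++ [String.ofList acc], [c], some c)
        else (res, acc ++ [c], some c) := rfl
    rw [hstep]
    by_cases hb : brk p c = true
    · rw [if_pos hb, ih _ _ _ (by simp)]
      simp only [specGo]
      rw [if_pos hb]
      simp
    · rw [if_neg hb, ih _ _ _ (by simp)]
      simp only [specGo]
      rw [if_neg hb]

lemma B_eq_spec (s : String) : turn_to_list_alt s = (spec s.toList).map String.ofList := by
  cases h : s.toList with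
  | nil => simp [turn_to_list_alt, h, finB, spec]
  | cons c t =>
    have h1 : turn_to_list_alt s = finB ((c :: t).foldl stepB ([], [], none)) := by
      rw [turn_to_list_alt, h]
    have hstep : stepB (([] : List String), ([] : List Char), (none : Option Char)) c =
        ([], [c], some c) := rfl
    rw [h1, List.foldl_cons, hstep, stepB_foldl t [] [c] c (by simp)]
    simp [spec]

-- ===== VERDICT (by name: the statement is the Claim_ definition above) =====
theorem turn_to_list_spec : Claim_equal_turn_to_list := by
  intro s _
  unfold Spec_turn_to_list
  rw [A_eq_spec, B_eq_spec]
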